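-- pv_equiv track=rewrite | github.com/tchapeaux/advent-of-code-2025 | day09.py | yieldPointInSegment
-- ===== SOURCE A (Python) =====
-- from math import copysign
--
-- def yieldPointInSegment(t1, t2):
--     dx = 0 if t1[0] == t2[0] else int(copysign(1, t2[0] - t1[0]))
--     dy = 0 if t1[1] == t2[1] else int(copysign(1, t2[1] - t1[1]))
--
--     yield t1
--     current = t1
--     while current != t2:
--         current = (current[0] + dx, current[1] + dy)
--         yield current
-- ===== SOURCE B (Python) =====
-- def yieldPointInSegment(t1, t2):
--     (x1, y1), (x2, y2) = t1, t2
--     sx = (x2 > x1) - (x2 < x1)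
--     sy = (y2 > y1) - (y2 < y1)
--     n = max(abs(x2 - x1), abs(y2 - y1))
--     for i in range(n + 1):
--         yield (x1 + i * sx, y1 + i * sy)
-- ===== Notes on version B (the rewrite author's own statement) =====
-- stated objective: simpler
-- what changed: B replaces A's while-loop that mutates a running point and compares it to the endpoint with a closed-form comprehension: it computes the number of steps n = max(|dx|,|dy|) up front and yields (x1+i*sx, y1+i*sy) for i in range(n+1).
import Mathlib
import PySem

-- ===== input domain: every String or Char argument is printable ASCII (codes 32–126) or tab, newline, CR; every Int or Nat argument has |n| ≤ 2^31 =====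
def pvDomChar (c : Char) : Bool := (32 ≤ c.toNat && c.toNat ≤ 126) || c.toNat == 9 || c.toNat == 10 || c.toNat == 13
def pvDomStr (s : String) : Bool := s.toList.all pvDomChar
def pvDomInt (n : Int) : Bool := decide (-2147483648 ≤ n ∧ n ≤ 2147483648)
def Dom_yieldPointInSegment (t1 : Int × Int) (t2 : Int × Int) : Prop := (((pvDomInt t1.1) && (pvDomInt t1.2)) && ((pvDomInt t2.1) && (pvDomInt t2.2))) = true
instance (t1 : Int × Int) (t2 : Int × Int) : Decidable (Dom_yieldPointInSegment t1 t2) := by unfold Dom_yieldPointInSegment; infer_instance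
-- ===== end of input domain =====

-- B replaces A's running-point while-loop with a closed-form map over an index range (same cost, simpler).


-- ===== PORT A =====
-- A's while-loop: step `current` by (dx,dy) and yield, until current == t2.
-- In Python the loop never terminates when the segment is neither axis-aligned nor 45°
-- diagonal; those inputs are outside Pre_, and a fuel argument (enough fuel inside Pre_)
-- makes the transcription total.
def loopA (t2 : Int × Int) (dx dy : Int) : Int × Int → Nat → List (Int × Int)
  | _, 0 => []
  | cur, f + 1 =>
      if cur = t2 then []
      else
        let c := (cur.1 + dx, cur.2 + dy)
        c :: loopA t2 dx dy c f

def yieldPointInSegment (t1 : Int × Int) (t2 : Int × Int) : List (Int × Int) :=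
  let dx : Int := if t1.1 = t2.1 then 0 else if t2.1 - t1.1 > 0 then 1 else -1
  let dy : Int := if t1.2 = t2.2 then 0 else if t2.2 - t1.2 > 0 then 1 else -1
  t1 :: loopA t2 dx dy t1 (max (t2.1 - t1.1).natAbs (t2.2 - t1.2).natAbs)

-- ===== PORT B =====
def yieldPointInSegment_alt (t1 : Int × Int) (t2 : Int × Int) : List (Int × Int) :=
  let sx : Int := if t2.1 > t1.1 then 1 else if t2.1 < t1.1 then -1 else 0
  let sy : Int := if t2.2 > t1.2 then 1 else if t2.2 < t1.2 then -1 else 0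
  let n : Nat := max (t2.1 - t1.1).natAbs (t2.2 - t1.2).natAbs
  (List.range (n + 1)).map (fun (i : Nat) => (t1.1 + (i : Int) * sx, t1.2 + (i : Int) * sy))

-- ===== PRECONDITION & SPEC =====
-- Pre_ excludes segments that are neither axis-aligned nor 45° diagonal: on those A's
-- generator never terminates (it returns no value), so nothing is claimed there.
def Pre_yieldPointInSegment (t1 : Int × Int) (t2 : Int × Int) : Prop :=
  t1.1 = t2.1 ∨ t1.2 = t2.2 ∨ (t2.1 - t1.1).natAbs = (t2.2 - t1.2).natAbs
instance (t1 : Int × Int) (t2 : Int × Int) : Decidable (Pre_yieldPointInSegment t1 t2) := by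
  unfold Pre_yieldPointInSegment; infer_instance

def pvWitness_yieldPointInSegment : (Int × Int) × (Int × Int) := ((0, 0), (2, 2))

def Spec_yieldPointInSegment (t1 : Int × Int) (t2 : Int × Int) (out : List (Int × Int)) : Prop := out = yieldPointInSegment_alt t1 t2
instance (t1 : Int × Int) (t2 : Int × Int) (out : List (Int × Int)) : Decidable (Spec_yieldPointInSegment t1 t2 out) := by unfold Spec_yieldPointInSegment; infer_instance

-- ===== CLAIM (what is proved, stated in full; the proofs are below) =====
def Claim_equal_yieldPointInSegment : Prop := ∀ (t1 : Int × Int) (t2 : Int × Int), Dom_yieldPointInSegment t1 t2 → Pre_yieldPointInSegment t1 t2 → Spec_yieldPointInSegment t1 t2 (yieldPointInSegment t1 t2)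

-- ===== LEMMAS AND PROOFS =====

-- A's loop, started at the k-th point of the arithmetic sequence with exactly the
-- remaining fuel, produces the rest of the sequence.
theorem loopA_eq (x1 y1 x2 y2 sx sy : Int) (n : Nat)
    (hmid : ∀ k : Nat, k < n → ¬(x1 + (k : Int) * sx = x2 ∧ y1 + (k : Int) * sy = y2)) :
    ∀ (m k : Nat), k + m = n →
      loopA (x2, y2) sx sy (x1 + (k : Int) * sx, y1 + (k : Int) * sy) m
        = (List.range m).map (fun j => (x1 + ((k + 1 + j : Nat) : Int) * sx, y1 + ((k + 1 + j : Nat) : Int) * sy)) := by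
  intro m
  induction m with
  | zero => intro k _; simp [loopA]
  | succ f ih =>
      intro k hk
      have hklt : k < n := by omega
      have hne : ((x1 + (k : Int) * sx, y1 + (k : Int) * sy) : Int × Int) ≠ (x2, y2) := by
        intro h
        exact hmid k hklt ⟨congrArg Prod.fst h, congrArg Prod.snd h⟩
      have hstep : (x1 + (k : Int) * sx + sx, y1 + (k : Int) * sy + sy)
          = (x1 + ((k + 1 : Nat) : Int) * sx, y1 + ((k + 1 : Nat) : Int) * sy) := by
        simp only [Prod.mk.injEq]; push_cast; constructor <;> ring
      rw [loopA, if_neg hne]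
      simp only []
      rw [hstep, ih (k + 1) (by omega)]
      rw [List.range_succ_eq_map]
      simp only [List.map_cons, List.map_map]
      rw [List.cons_eq_cons]
      refine ⟨by norm_num, ?_⟩
      apply List.map_congr_left
      intro j _
      simp only [Function.comp, Prod.mk.injEq]
      push_cast
      constructor <;> ring

-- Under Pre_, the arithmetic sequence hits t2 exactly at step n = max(|dx|,|dy|).
theorem seq_facts (x1 y1 x2 y2 sx sy : Int)
    (hsx : sx = if x2 > x1 then 1 else if x2 < x1 then -1 else 0)
    (hsy : sy = if y2 > y1 then 1 else if y2 < y1 then -1 else 0)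
    (hpre : x1 = x2 ∨ y1 = y2 ∨ (x2 - x1).natAbs = (y2 - y1).natAbs) :
    (x1 + ((max (x2 - x1).natAbs (y2 - y1).natAbs : Nat) : Int) * sx = x2
      ∧ y1 + ((max (x2 - x1).natAbs (y2 - y1).natAbs : Nat) : Int) * sy = y2)
    ∧ ∀ k : Nat, k < max (x2 - x1).natAbs (y2 - y1).natAbs →
        ¬(x1 + (k : Int) * sx = x2 ∧ y1 + (k : Int) * sy = y2) := by
  rcases lt_trichotomy x1 x2 with hx | hx | hx <;>
    rcases lt_trichotomy y1 y2 with hy | hy | hy <;>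
      simp only [hsx, hsy] <;>
      · constructor
        · constructor <;>
          · split_ifs <;> omega
        · intro k hk ⟨h1, h2⟩
          revert h1 h2
          split_ifs <;> omega

theorem sign_eqA (a b : Int) :
    (if a = b then (0 : Int) else if b - a > 0 then 1 else -1)
      = (if b > a then 1 else if b < a then -1 else 0) := by
  split_ifs <;> omega

-- ===== VERDICT (by name: the statement is the Claim_ definition above) =====
theorem yieldPointInSegment_spec : Claim_equal_yieldPointInSegment := by
  intro t1 t2 _ hpre
  obtain ⟨x1, y1⟩ := t1
  obtain ⟨x2, y2⟩ := t2
  unfold Spec_yieldPointInSegment yieldPointInSegment yieldPointInSegment_alt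
  simp only [sign_eqA]
  set sx : Int := if x2 > x1 then 1 else if x2 < x1 then -1 else 0 with hsx
  set sy : Int := if y2 > y1 then 1 else if y2 < y1 then -1 else 0 with hsy
  set n : Nat := max (x2 - x1).natAbs (y2 - y1).natAbs with hn
  obtain ⟨_hend, hmid⟩ := seq_facts x1 y1 x2 y2 sx sy hsx hsy hpre
  have h0 : ((x1, y1) : Int × Int) = (x1 + ((0 : Nat) : Int) * sx, y1 + ((0 : Nat) : Int) * sy) := by
    simp
  rw [h0, loopA_eq x1 y1 x2 y2 sx sy n hmid n 0 (by omega)]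
  rw [List.range_succ_eq_map, List.map_cons, List.map_map, List.cons_eq_cons]
  refine ⟨by norm_num, ?_⟩
  apply List.map_congr_left
  intro j _
  simp only [Function.comp, Prod.mk.injEq]
  push_cast
  constructor <;> ring
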